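-- pv_equiv track=rewrite | github.com/ahyun0/Algorithm_study | Programmers/연습문제/약수의 개수와 덧셈.py | solution
-- ===== SOURCE A (Python) =====
-- def solution(left, right):
--     answer = 0
--
--     for i in range(left, right+1):
--         lst = []
--         for j in range(1, i+1):
--             if (j not in lst) and (i%j == 0):
--                 lst.append(j)
--                 lst.append(i//j)
--
--         if len(set(lst)) % 2 == 0:
--             answer+= i
--         else:
--             answer -= i
--
--     return answer
-- ===== SOURCE B (Python) =====
-- def solution(left, right):
--     if left > right:
--         return 0
--     total = (left + right) * (right - left + 1) // 2
--     sq = 0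
--     k = 1
--     while k * k <= right:
--         if k * k >= left:
--             sq += k * k
--         k += 1
--     return total - 2 * sq
-- ===== Notes on version B (the rewrite author's own statement) =====
-- stated objective: alternative
-- what changed: A enumerates and deduplicates all divisors of every i in the range to test the parity of the divisor count; B uses the fact that the divisor count is odd exactly for positive perfect squares, so it returns the Gauss closed-form sum of the range minus twice the sum of the perfect squares in it, found by a single sqrt-bounded loop.
import Mathlib
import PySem

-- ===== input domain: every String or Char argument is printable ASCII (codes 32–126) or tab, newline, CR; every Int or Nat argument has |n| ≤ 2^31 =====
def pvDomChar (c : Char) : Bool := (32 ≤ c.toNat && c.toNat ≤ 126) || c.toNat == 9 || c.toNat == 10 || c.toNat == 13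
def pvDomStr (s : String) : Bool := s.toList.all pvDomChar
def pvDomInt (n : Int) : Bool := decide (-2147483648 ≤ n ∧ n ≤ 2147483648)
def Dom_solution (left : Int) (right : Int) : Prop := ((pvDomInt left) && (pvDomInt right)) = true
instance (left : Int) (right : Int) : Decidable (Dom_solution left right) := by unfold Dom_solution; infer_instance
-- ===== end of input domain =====

-- B replaces A's per-number divisor enumeration by a different algorithm: the closed-form
-- range sum minus twice the sum of the perfect squares in the range (the divisor count is odd
-- iff the number is a positive perfect square), found by one sqrt-bounded loop.

-- ===== PORT A =====
def solution (left : Int) (right : Int) : Int :=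
  (PySem.List.pyRange left (right + 1) 1).foldl (fun answer i =>
    let lst := (PySem.List.pyRange 1 (i + 1) 1).foldl (fun lst j =>
      if (!lst.contains j) && (PySem.Int.mod i j == 0) then
        (lst ++ [j]) ++ [PySem.Int.floordiv i j]
      else lst) []
    if (PySem.Set.ofList lst).length % 2 == 0 then answer + i else answer - i) 0

-- ===== PORT B =====
-- the while-loop of Source B: k runs while k*k ≤ right, accumulating the squares that are ≥ left
def sqLoop (right : Int) (left : Int) (k : Int) (sq : Int) : Int :=
  if k * k ≤ right then
    sqLoop right left (k + 1) (if left ≤ k * k then sq + k * k else sq)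
  else sq
termination_by (right + 1 - k).toNat
decreasing_by
  have hk : k ≤ right := by nlinarith [sq_nonneg (k - 1), mul_self_nonneg k]
  omega

def solution_alt (left : Int) (right : Int) : Int :=
  if left > right then 0
  else
    let total := PySem.Int.floordiv ((left + right) * (right - left + 1)) 2
    total - 2 * sqLoop right left 1 0

-- ===== PRECONDITION & SPEC =====
def Spec_solution (left : Int) (right : Int) (out : Int) : Prop := out = solution_alt left right
instance (left : Int) (right : Int) (out : Int) : Decidable (Spec_solution left right out) := by unfold Spec_solution; infer_instance

-- ===== CLAIM (what is proved, stated in full; the proofs are below) =====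
def Claim_equal_solution : Prop := ∀ (left : Int) (right : Int), Dom_solution left right → Spec_solution left right (solution left right)

-- ===== LEMMAS AND PROOFS =====

-- per-element contribution of A's outer loop
def pvG (i : Int) : Int :=
  if 1 ≤ i ∧ Int.sqrt i * Int.sqrt i = i then -i else i

-- model of A's inner list after processing j = 1..n: for each divisor j with j*j ≤ i,
-- the pair [j, i/j] is appended
def pvPairs (i : Int) : Nat → List Int
  | 0 => []
  | n + 1 =>
      pvPairs i n ++
        (if ((n : Int) + 1) ∣ i ∧ ((n : Int) + 1) * ((n : Int) + 1) ≤ i then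
          [((n : Int) + 1), i / ((n : Int) + 1)] else [])

theorem pvMem_pairs (i : Int) (n : Nat) (d : Int) :
    d ∈ pvPairs i n ↔ ∃ a : Int, 1 ≤ a ∧ a ≤ (n : Int) ∧ a ∣ i ∧ a * a ≤ i ∧ (d = a ∨ d = i / a) := by
  induction n with
  | zero => simp [pvPairs]; intro a h1 h2; omega
  | succ n ih =>
      simp only [pvPairs, List.mem_append, ih]
      constructor
      · rintro (⟨a, h1, h2, h3, h4, h5⟩ | h)
        · exact ⟨a, h1, by push_cast; omega, h3, h4, h5⟩
        · by_cases hc : ((n : Int) + 1) ∣ i ∧ ((n : Int) + 1) * ((n : Int) + 1) ≤ i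
          · simp [hc] at h
            exact ⟨(n : Int) + 1, by omega, by push_cast; omega, hc.1, hc.2, by tauto⟩
          · simp [hc] at h
      · rintro ⟨a, h1, h2, h3, h4, h5⟩
        by_cases ha : a ≤ (n : Int)
        · exact Or.inl ⟨a, h1, ha, h3, h4, h5⟩
        · have : a = (n : Int) + 1 := by push_cast at h2 ⊢; omega
          subst this
          right; simp [h3, h4]; tauto

-- basic facts about a positive divisor a of a positive i
theorem pvDiv_pos (i a : Int) (hi : 1 ≤ i) (ha : 1 ≤ a) (hd : a ∣ i) : 1 ≤ i / a := by
  rw [Int.le_ediv_iff_mul_le (by omega)]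
  simpa using Int.le_of_dvd (by omega) hd

theorem pvMul_div (i a : Int) (ha : a ≠ 0) (hd : a ∣ i) : a * (i / a) = i := by
  rcases hd with ⟨c, rfl⟩
  rw [Int.mul_ediv_cancel_left _ ha]

-- the trigger characterisation: b is already in the list iff b divides i and b*b > i
theorem pvMem_pairs_iff (i b : Int) (n : Nat) (hi : 1 ≤ i) (hb : b = (n : Int) + 1) :
    b ∈ pvPairs i n ↔ b ∣ i ∧ i < b * b := by
  have hb1 : 1 ≤ b := by omega
  rw [pvMem_pairs]
  constructor
  · rintro ⟨a, h1, h2, h3, h4, h5⟩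
    have hane : a ≠ 0 := by omega
    rcases h5 with rfl | rfl
    · omega
    · have hia := pvMul_div i a hane h3
      have hdvd : (i / a) ∣ i := ⟨a, by linarith [hia, mul_comm a (i / a)]⟩
      constructor
      · exact hdvd
      · -- i = a * (i/a), a ≤ n < b = i/a, so i < (i/a)^2
        have hlt : a < i / a := by omega
        have h1d : 1 ≤ i / a := pvDiv_pos i a hi (by omega) h3
        nlinarith [hia]
  · rintro ⟨hdvd, hlt⟩
    have hbne : b ≠ 0 := by omega
    refine ⟨i / b, pvDiv_pos i b hi hb1 hdvd, ?_, ⟨b, by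
      have := pvMul_div i b hbne hdvd; linarith [mul_comm b (i / b)]⟩, ?_, Or.inr ?_⟩
    · -- i / b ≤ n, i.e. i / b < b
      have : i / b < b := by rw [Int.ediv_lt_iff_lt_mul (by omega)]; exact hlt
      omega
    · -- (i/b)^2 ≤ i  since  (i/b) * b = i and i/b < b
      have hib := pvMul_div i b hbne hdvd
      have h1d : 1 ≤ i / b := pvDiv_pos i b hi hb1 hdvd
      have : i / b < b := by rw [Int.ediv_lt_iff_lt_mul (by omega)]; exact hlt
      nlinarith [hib]
    · -- i / (i / b) = b
      have hib := pvMul_div i b hbne hdvd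
      have h1d : 1 ≤ i / b := pvDiv_pos i b hi hb1 hdvd
      have heq : (i / b) * b = i := by linarith [mul_comm b (i / b)]
      have hcan : (i / b) * b / (i / b) = b := Int.mul_ediv_cancel_left _ (by omega)
      calc b = (i / b) * b / (i / b) := hcan.symm
        _ = i / (i / b) := by rw [heq]

-- A's inner fold builds exactly pvPairs
theorem pvInner_fold (i : Int) (hi : 1 ≤ i) (n : Nat) (hn : (n : Int) ≤ i) :
    (PySem.List.pyRange 1 ((n : Int) + 1) 1).foldl (fun lst j =>
      if (!lst.contains j) && (PySem.Int.mod i j == 0) then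
        (lst ++ [j]) ++ [PySem.Int.floordiv i j]
      else lst) [] = pvPairs i n := by
  induction n with
  | zero => simp [PySem.List.pyRange_one_eq_nil (by omega : ((0:Nat) : Int) + 1 ≤ 1), pvPairs]
  | succ n ih =>
      have hstep : ((1 : Int) ≤ (n : Int) + 1) := by omega
      rw [show (((n + 1 : Nat)) : Int) + 1 = ((n : Int) + 1) + 1 by push_cast; ring,
        PySem.List.pyRange_one_succ_right hstep, List.foldl_append,
        ih (by push_cast at hn ⊢; omega)]
      set b : Int := (n : Int) + 1 with hbdef
      have hb1 : 1 ≤ b := by omega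
      have hmem := pvMem_pairs_iff i b n hi rfl
      simp only [List.foldl_cons, List.foldl_nil]
      by_cases hdvd : b ∣ i
      · have hmod : PySem.Int.mod i b = 0 := by
          rw [PySem.Int.mod_eq_zero_iff_dvd]; exact hdvd
        by_cases hsq : b * b ≤ i
        · have hnotmem : b ∉ pvPairs i n := by rw [hmem]; rintro ⟨-, h⟩; omega
          have hcont : (pvPairs i n).contains b = false := by
            rw [← Bool.not_eq_true, List.contains_iff_mem]; exact hnotmem
          rw [hcont]
          simp only [hmod, Bool.not_false, Bool.true_and, beq_self_eq_true, if_true]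
          have hfd : PySem.Int.floordiv i b = i / b :=
            PySem.Int.floordiv_eq_ediv_of_pos (by omega)
          simp [pvPairs, hdvd, hsq, hfd, ← hbdef]
        · have hmemb : b ∈ pvPairs i n := by rw [hmem]; exact ⟨hdvd, by omega⟩
          have hcont : (pvPairs i n).contains b = true := List.contains_iff_mem.mpr hmemb
          rw [hcont]
          simp [pvPairs, hsq, ← hbdef]
      · have hmod : ¬ (PySem.Int.mod i b = 0) := by
          rw [PySem.Int.mod_eq_zero_iff_dvd]; exact hdvd
        simp only [Bool.and_eq_true, beq_iff_eq]
        rw [if_neg (by simp [hmod])]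
        simp [pvPairs, hdvd, ← hbdef]

-- the finset of "small" divisors of i
noncomputable def pvS (i : Int) : Finset Int := (Finset.Icc 1 i).filter (fun d => d ∣ i ∧ d * d ≤ i)

theorem pvToFinset_pairs (i : Int) (hi : 1 ≤ i) :
    (pvPairs i i.toNat).toFinset = pvS i ∪ (pvS i).image (fun a => i / a) := by
  ext d
  simp only [List.mem_toFinset, pvMem_pairs, Finset.mem_union, Finset.mem_image, pvS,
    Finset.mem_filter, Finset.mem_Icc]
  constructor
  · rintro ⟨a, h1, h2, h3, h4, h5⟩
    have ha_le : a ≤ i := Int.le_of_dvd (by omega) h3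
    rcases h5 with rfl | rfl
    · exact Or.inl ⟨⟨h1, ha_le⟩, h3, h4⟩
    · exact Or.inr ⟨a, ⟨⟨h1, ha_le⟩, h3, h4⟩, rfl⟩
  · rintro (⟨⟨h1, h2⟩, h3, h4⟩ | ⟨a, ⟨⟨h1, h2⟩, h3, h4⟩, rfl⟩)
    · exact ⟨d, h1, by omega, h3, h4, Or.inl rfl⟩
    · exact ⟨a, h1, by omega, h3, h4, Or.inr rfl⟩

theorem pvInj_on (i : Int) (hi : 1 ≤ i) :
    Set.InjOn (fun a => i / a) (pvS i) := by
  intro a ha b hb h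
  simp only [pvS, Finset.coe_filter, Finset.mem_Icc, Set.mem_setOf_eq] at ha hb
  obtain ⟨⟨ha1, _⟩, ha3, _⟩ := ha
  obtain ⟨⟨hb1, _⟩, hb3, _⟩ := hb
  simp only at h
  have h1 := pvMul_div i a (by omega) ha3
  have h2 := pvMul_div i b (by omega) hb3
  rw [h] at h1
  have hd1 : 1 ≤ i / b := pvDiv_pos i b hi hb1 hb3
  nlinarith [h1, h2]

theorem pvInter_eq (i : Int) (hi : 1 ≤ i) :
    pvS i ∩ (pvS i).image (fun a => i / a) =
      if Int.sqrt i * Int.sqrt i = i then {Int.sqrt i} else ∅ := by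
  ext d
  simp only [Finset.mem_inter, Finset.mem_image, pvS, Finset.mem_filter, Finset.mem_Icc]
  constructor
  · rintro ⟨⟨⟨h1, h2⟩, h3, h4⟩, a, ⟨⟨ha1, ha2⟩, ha3, ha4⟩, rfl⟩
    -- (i/a)*(i/a) ≤ i and a*a ≤ i with a*(i/a) = i force (i/a)*(i/a) = i
    have hia := pvMul_div i a (by omega) ha3
    have hd1 : 1 ≤ i / a := pvDiv_pos i a hi ha1 ha3
    have hsq : (i / a) * (i / a) = i := by nlinarith [hia]
    have hs : Int.sqrt ((i / a) * (i / a)) = (i / a).natAbs := Int.sqrt_eq _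
    have habs : ((i / a).natAbs : Int) = i / a := Int.natAbs_of_nonneg (by omega)
    rw [hsq] at hs
    rw [if_pos (by rw [hs, habs]; exact hsq)]
    simp [hs, habs]
  · intro hd
    by_cases hs : Int.sqrt i * Int.sqrt i = i
    · rw [if_pos hs] at hd
      simp only [Finset.mem_singleton] at hd
      subst hd
      set s := Int.sqrt i with hsdef
      have hs0 : 0 ≤ s := Int.sqrt_nonneg i
      have hs1 : 1 ≤ s := by nlinarith [hs]
      have hdvd : s ∣ i := ⟨s, hs.symm⟩
      have hdiv : i / s = s := by rw [← hs, Int.mul_ediv_cancel_left _ (by omega)]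
      have hle : s ≤ i := Int.le_of_dvd (by omega) hdvd
      exact ⟨⟨⟨hs1, hle⟩, hdvd, by omega⟩, s, ⟨⟨hs1, hle⟩, hdvd, by omega⟩, hdiv⟩
    · rw [if_neg hs] at hd
      simp at hd

-- parity of the deduplicated divisor list
theorem pvParity (i : Int) (hi : 1 ≤ i) :
    (PySem.Set.ofList (pvPairs i i.toNat)).length % 2 =
      (if Int.sqrt i * Int.sqrt i = i then 1 else 0) := by
  have hnd : (PySem.Set.ofList (pvPairs i i.toNat)).Nodup := PySem.Set.nodup_ofList _
  have hlen : (PySem.Set.ofList (pvPairs i i.toNat)).length =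
      (pvPairs i i.toNat).toFinset.card := by
    rw [← List.toFinset_card_of_nodup hnd]
    congr 1
    ext x
    simp [PySem.Set.mem_ofList]
  rw [hlen, pvToFinset_pairs i hi]
  have hcard := Finset.card_union_add_card_inter (pvS i) ((pvS i).image (fun a => i / a))
  have himg : ((pvS i).image (fun a => i / a)).card = (pvS i).card :=
    Finset.card_image_of_injOn (pvInj_on i hi)
  rw [pvInter_eq i hi, himg] at hcard
  by_cases hs : Int.sqrt i * Int.sqrt i = i
  · rw [if_pos hs] at hcard ⊢
    simp only [Finset.card_singleton] at hcard
    omega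
  · rw [if_neg hs] at hcard ⊢
    simp only [Finset.card_empty] at hcard
    omega

-- A's outer step adds exactly pvG i
theorem pvStep (answer i : Int) :
    (let lst := (PySem.List.pyRange 1 (i + 1) 1).foldl (fun lst j =>
      if (!lst.contains j) && (PySem.Int.mod i j == 0) then
        (lst ++ [j]) ++ [PySem.Int.floordiv i j]
      else lst) []
     if (PySem.Set.ofList lst).length % 2 == 0 then answer + i else answer - i) =
    answer + pvG i := by
  by_cases hi : 1 ≤ i
  · have hcast : ((i.toNat : Int)) = i := Int.toNat_of_nonneg (by omega)
    have hfold := pvInner_fold i hi i.toNat (by omega)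
    rw [hcast] at hfold
    simp only [hfold]
    have hpar := pvParity i hi
    by_cases hs : Int.sqrt i * Int.sqrt i = i
    · rw [if_pos hs] at hpar
      rw [if_neg (by simp [hpar]), pvG, if_pos ⟨hi, hs⟩]; ring
    · rw [if_neg hs] at hpar
      rw [if_pos (by simp [hpar]), pvG, if_neg (by tauto)]
  · have hnil : PySem.List.pyRange 1 (i + 1) 1 = [] :=
      PySem.List.pyRange_one_eq_nil (by omega)
    simp only [hnil, List.foldl_nil]
    rw [if_pos (by decide), pvG, if_neg (by tauto)]

-- A as a sum of pvG over the range
theorem pvFoldG (xs : List Int) (a : Int) :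
    xs.foldl (fun answer i =>
      let lst := (PySem.List.pyRange 1 (i + 1) 1).foldl (fun lst j =>
        if (!lst.contains j) && (PySem.Int.mod i j == 0) then
          (lst ++ [j]) ++ [PySem.Int.floordiv i j]
        else lst) []
      if (PySem.Set.ofList lst).length % 2 == 0 then answer + i else answer - i) a =
    a + (xs.map pvG).sum := by
  induction xs generalizing a with
  | nil => simp
  | cons x xs ih =>
      simp only [List.foldl_cons, List.map_cons, List.sum_cons]
      rw [ih, pvStep a x]; ring

theorem pvSolution_eq_sum (left right : Int) :
    solution left right = ((PySem.List.pyRange left (right + 1) 1).map pvG).sum := by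
  rw [solution, pvFoldG]; ring

-- sum over an Icc of Ints equals the list-range sum
theorem pvRange_sum_aux (f : Int → Int) : ∀ (n : Nat) (left right : Int),
    (right + 1 - left).toNat = n →
    ((PySem.List.pyRange left (right + 1) 1).map f).sum = ∑ i ∈ Finset.Icc left right, f i := by
  intro n
  induction n with
  | zero =>
      intro left right h
      rw [PySem.List.pyRange_one_eq_nil (by omega), Finset.Icc_eq_empty (by omega)]
      simp
  | succ n ih =>
      intro left right h
      have hlr : left ≤ right := by omega
      rw [PySem.List.pyRange_one_succ_right hlr, List.map_append, List.sum_append]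
      have hrec := ih left (right - 1) (by omega)
      rw [show right - 1 + 1 = right by ring] at hrec
      rw [hrec, show Finset.Icc left right = insert right (Finset.Icc left (right - 1)) by
        ext x; simp only [Finset.mem_Icc, Finset.mem_insert]; omega,
        Finset.sum_insert (by simp only [Finset.mem_Icc]; omega)]
      simp only [List.map_cons, List.map_nil, List.sum_cons, List.sum_nil]
      ring

theorem pvRange_sum_eq (left right : Int) (f : Int → Int) :
    ((PySem.List.pyRange left (right + 1) 1).map f).sum = ∑ i ∈ Finset.Icc left right, f i :=
  pvRange_sum_aux f (right + 1 - left).toNat left right rfl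

-- k*k ≤ right ↔ k ≤ sqrt right, for 1 ≤ k
theorem pvLe_sqrt (k right : Int) (hk : 1 ≤ k) : k * k ≤ right ↔ k ≤ Int.sqrt right := by
  have hdef : Int.sqrt right = ((Nat.sqrt right.toNat : Nat) : Int) := rfl
  have hK : ((k.toNat : Int)) = k := Int.toNat_of_nonneg (by omega)
  constructor
  · intro h
    have hr0 : 0 ≤ right := by nlinarith
    have h1 : (↑(k.toNat * k.toNat) : Int) ≤ right := by push_cast; rw [hK]; exact h
    have h2 : k.toNat * k.toNat ≤ right.toNat := by
      rw [← Int.toNat_of_nonneg hr0] at h1; exact_mod_cast h1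
    have h3 := Nat.le_sqrt.mpr h2
    rw [hdef]
    omega
  · intro h
    by_cases hr0 : (0:Int) ≤ right
    · have h1 : k.toNat ≤ Nat.sqrt right.toNat := by rw [hdef] at h; omega
      have h2 := Nat.le_sqrt.mp h1
      have h3 : ((k.toNat * k.toNat : Nat) : Int) ≤ ((right.toNat : Nat) : Int) := by
        exact_mod_cast h2
      push_cast at h3
      rw [hK, Int.toNat_of_nonneg hr0] at h3
      exact h3
    · exfalso
      push_neg at hr0
      have h0 : right.toNat = 0 := by omega
      rw [hdef, h0, Nat.sqrt_zero] at h
      omega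

theorem pvSqLoop_spec (right left : Int) (k sq : Int) (hk : 1 ≤ k) :
    sqLoop right left k sq =
      sq + ∑ m ∈ Finset.Icc k (Int.sqrt right), (if left ≤ m * m then m * m else 0) := by
  by_cases h : k * k ≤ right
  · have hle : k ≤ Int.sqrt right := (pvLe_sqrt k right hk).mp h
    rw [sqLoop, if_pos h, pvSqLoop_spec right left (k + 1) _ (by omega)]
    rw [show Finset.Icc k (Int.sqrt right) = insert k (Finset.Icc (k + 1) (Int.sqrt right)) by
      ext x; simp only [Finset.mem_Icc, Finset.mem_insert]; omega]
    rw [Finset.sum_insert (by simp only [Finset.mem_Icc]; omega)]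
    by_cases hl : left ≤ k * k
    · rw [if_pos hl, if_pos hl]; ring
    · rw [if_neg hl, if_neg hl]; ring
  · have hgt : Int.sqrt right < k := by
      by_contra hc
      push_neg at hc
      exact h ((pvLe_sqrt k right hk).mpr hc)
    rw [sqLoop, if_neg h, Finset.Icc_eq_empty (by omega)]
    simp
termination_by (right + 1 - k).toNat
decreasing_by
  have hk2 : k ≤ right := by nlinarith [sq_nonneg (k - 1), mul_self_nonneg k]
  omega

-- Gauss formula
theorem pvGauss (left right : Int) (h : left ≤ right) :
    PySem.Int.floordiv ((left + right) * (right - left + 1)) 2 =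
      ∑ i ∈ Finset.Icc left right, i := by
  have key : (left + right) * (right - left + 1) = 2 * ∑ i ∈ Finset.Icc left right, i := by
    induction hr : (right - left).toNat generalizing right with
    | zero =>
        have : right = left := by omega
        subst this
        simp [Finset.Icc_self]
        ring
    | succ n ih =>
        have h1 : left ≤ right - 1 := by omega
        have ihv := ih (right - 1) h1 (by omega)
        rw [show Finset.Icc left right = insert right (Finset.Icc left (right - 1)) by
          ext x; simp only [Finset.mem_Icc, Finset.mem_insert]; omega]
        rw [Finset.sum_insert (by simp only [Finset.mem_Icc]; omega)]
        have : (left + (right - 1)) * ((right - 1) - left + 1) =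
            2 * ∑ i ∈ Finset.Icc left (right - 1), i := ihv
        linear_combination this
  rw [key, PySem.Int.floordiv_eq_ediv_of_pos (by omega), Int.mul_ediv_cancel_left _ (by omega)]

-- reindexing: positive perfect squares in [left, right] are exactly m*m for m ∈ [1, sqrt right]
theorem pvReindex (left right : Int) :
    ∑ i ∈ Finset.Icc left right, (if 1 ≤ i ∧ Int.sqrt i * Int.sqrt i = i then i else 0) =
      ∑ m ∈ Finset.Icc 1 (Int.sqrt right), (if left ≤ m * m then m * m else 0) := by
  rw [← Finset.sum_filter, ← Finset.sum_filter]
  refine Finset.sum_nbij' (fun i => Int.sqrt i) (fun m => m * m) ?_ ?_ ?_ ?_ ?_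
  · intro i hi
    simp only [Finset.mem_filter, Finset.mem_Icc] at hi ⊢
    obtain ⟨⟨h1, h2⟩, h3, h4⟩ := hi
    have hs0 : 0 ≤ Int.sqrt i := Int.sqrt_nonneg i
    have hs1 : 1 ≤ Int.sqrt i := by nlinarith
    exact ⟨⟨hs1, (pvLe_sqrt _ _ hs1).mp (by rw [h4]; exact h2)⟩, by rw [h4]; exact h1⟩
  · intro m hm
    simp only [Finset.mem_filter, Finset.mem_Icc] at hm ⊢
    obtain ⟨⟨h1, h2⟩, h3⟩ := hm
    have hsq : Int.sqrt (m * m) = m := by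
      rw [Int.sqrt_eq, Int.natAbs_of_nonneg (by omega)]
    exact ⟨⟨h3, (pvLe_sqrt m right h1).mpr h2⟩, by nlinarith, by rw [hsq]⟩
  · intro i hi
    simp only [Finset.mem_filter, Finset.mem_Icc] at hi
    show i.sqrt * i.sqrt = i
    exact hi.2.2
  · intro m hm
    simp only [Finset.mem_filter, Finset.mem_Icc] at hm
    show Int.sqrt (m * m) = m
    rw [Int.sqrt_eq, Int.natAbs_of_nonneg (by omega)]
  · intro i hi
    simp only [Finset.mem_filter, Finset.mem_Icc] at hi
    show i = i.sqrt * i.sqrt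
    exact hi.2.2.symm

-- the master identity
theorem pvMain (left right : Int) (h : left ≤ right) :
    ∑ i ∈ Finset.Icc left right, pvG i =
      (∑ i ∈ Finset.Icc left right, i) -
        2 * ∑ m ∈ Finset.Icc 1 (Int.sqrt right), (if left ≤ m * m then m * m else 0) := by
  have hg : ∀ i : Int, pvG i = i - 2 * (if 1 ≤ i ∧ Int.sqrt i * Int.sqrt i = i then i else 0) := by
    intro i
    by_cases hc : 1 ≤ i ∧ Int.sqrt i * Int.sqrt i = i <;> simp [pvG, hc] <;> ring
  calc ∑ i ∈ Finset.Icc left right, pvG i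
      = ∑ i ∈ Finset.Icc left right,
          (i - 2 * (if 1 ≤ i ∧ Int.sqrt i * Int.sqrt i = i then i else 0)) := by
        exact Finset.sum_congr rfl (fun i _ => hg i)
    _ = (∑ i ∈ Finset.Icc left right, i) -
          2 * ∑ i ∈ Finset.Icc left right, (if 1 ≤ i ∧ Int.sqrt i * Int.sqrt i = i then i else 0) := by
        rw [Finset.sum_sub_distrib, ← Finset.mul_sum]
    _ = _ := by rw [pvReindex]

-- ===== VERDICT (by name: the statement is the Claim_ definition above) =====
theorem solution_spec : Claim_equal_solution := by
  intro left right _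
  unfold Spec_solution
  rw [pvSolution_eq_sum, pvRange_sum_eq]
  unfold solution_alt
  by_cases h : left > right
  · rw [if_pos h, Finset.Icc_eq_empty (by omega)]
    simp
  · push_neg at h
    rw [if_neg (by omega)]
    simp only []
    rw [pvGauss left right h, pvSqLoop_spec right left 1 0 le_rfl, pvMain left right h]
    ring
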